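-- pv_equiv track=rewrite | github.com/LimJih00n/CODE_TEST | 250313/2048 게임/2048-game.py | gen_h
-- ===== SOURCE A (Python) =====
-- def gen_h(elements,r):
--     re = []
--
--     def dfs(path):
--
--         if len(path) == r:
--             re.append(path[:])
--             return re
--         for i in range(len(elements)):
--             path.append(elements[i])
--             dfs(path)
--             path.pop()
--     dfs([])
--     return re
-- ===== SOURCE B (Python) =====
-- def gen_h(elements, r):
--     if not elements:
--         # empty alphabet: the only sequence at all is the empty one (length 0)
--         return [[]] if r == 0 else []
--     result = [[]]
--     for _ in range(r):
--         result = [p + [elem] for p in result for elem in elements]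
--     return result
-- ===== Notes on version B (the rewrite author's own statement) =====
-- stated objective: simpler
-- what changed: Replaces the recursive DFS with mutable path/accumulator by an iterative level-by-level product: start from [[]] and extend every partial sequence by every element, r times.
import Mathlib
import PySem

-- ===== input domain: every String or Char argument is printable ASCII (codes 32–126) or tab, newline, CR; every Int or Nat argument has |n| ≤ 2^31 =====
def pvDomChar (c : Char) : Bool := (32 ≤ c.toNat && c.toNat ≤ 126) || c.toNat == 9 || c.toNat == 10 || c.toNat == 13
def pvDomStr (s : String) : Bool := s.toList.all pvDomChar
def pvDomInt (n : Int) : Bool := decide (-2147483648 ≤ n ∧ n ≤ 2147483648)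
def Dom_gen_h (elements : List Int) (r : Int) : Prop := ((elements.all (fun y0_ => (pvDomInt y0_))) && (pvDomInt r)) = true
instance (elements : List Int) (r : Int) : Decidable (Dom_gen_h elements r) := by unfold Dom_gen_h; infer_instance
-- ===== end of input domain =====

-- B replaces A's recursive DFS by an iterative level-by-level product build (objective: simpler).

-- ===== PORT A =====
-- A's dfs recursion, fuel = r - len(path) (the recursion depth Python actually uses when 0 ≤ r;
-- the fuel-0 fallback is never reached inside Pre_, it only totalizes the r < 0 infinite recursion).
def gen_hDfs (elements : List Int) (r : Int) (fuel : Nat) (path : List Int) (re : List (List Int)) :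
    List (List Int) :=
  if (path.length : Int) = r then re ++ [path]
  else match fuel with
    | 0 => re
    | fuel' + 1 => elements.foldl (fun acc e => gen_hDfs elements r fuel' (path ++ [e]) acc) re

def gen_h (elements : List Int) (r : Int) : List (List Int) :=
  gen_hDfs elements r r.toNat [] []

-- ===== PORT B =====
def gen_h_alt (elements : List Int) (r : Int) : List (List Int) :=
  if elements = [] then (if r = 0 then [[]] else [])
  else
    (PySem.List.pyRange 0 r 1).foldl
      (fun result _ => result.flatMap (fun p => elements.map (fun elem => p ++ [elem])))
      [[]]

-- ===== PRECONDITION & SPEC =====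
-- Pre_ excludes exactly the inputs on which A raises: for r < 0 with nonempty elements A's dfs
-- base case len(path) == r can never fire, so it recurses forever (RecursionError in Python).
def Pre_gen_h (elements : List Int) (r : Int) : Prop := 0 ≤ r ∨ elements = []
instance (elements : List Int) (r : Int) : Decidable (Pre_gen_h elements r) := by
  unfold Pre_gen_h; infer_instance
def pvWitness_gen_h : List Int × Int := ([1, 2], 2)


def Spec_gen_h (elements : List Int) (r : Int) (out : List (List Int)) : Prop :=
  out = gen_h_alt elements r
instance (elements : List Int) (r : Int) (out : List (List Int)) : Decidable (Spec_gen_h elements r out) := by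
  unfold Spec_gen_h; infer_instance

-- ===== CLAIM (what is proved, stated in full; the proofs are below) =====
def Claim_equal_gen_h : Prop := ∀ (elements : List Int) (r : Int),
  Dom_gen_h elements r → Pre_gen_h elements r → Spec_gen_h elements r (gen_h elements r)

-- ===== LEMMAS AND PROOFS =====

-- canonical front-first product: F n = all length-n sequences in A's DFS order
def pvF (elements : List Int) : Nat → List (List Int)
  | 0 => [[]]
  | n + 1 => elements.flatMap (fun e => (pvF elements n).map (fun t => e :: t))

-- extending every sequence at the back is the same as branching at the front
theorem pvF_succ_back (elements : List Int) (n : Nat) :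
    pvF elements (n + 1) =
      (pvF elements n).flatMap (fun p => elements.map (fun e => p ++ [e])) := by
  induction n with
  | zero =>
      simp only [pvF]
      induction elements with
      | nil => simp
      | cons x xs ih => simp_all
  | succ n ih =>
      calc pvF elements (n + 2)
          = elements.flatMap (fun e => (pvF elements (n + 1)).map (fun t => e :: t)) := rfl
        _ = elements.flatMap (fun e =>
              (((pvF elements n).flatMap (fun p => elements.map (fun f => p ++ [f]))).map
                (fun t => e :: t))) := by rw [ih]
        _ = (pvF elements (n + 1)).flatMap (fun p => elements.map (fun e => p ++ [e])) := by
              simp [pvF, List.map_flatMap, List.flatMap_map, List.flatMap_assoc,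
                Function.comp_def]

theorem gen_hDfs_eq (elements : List Int) (r : Int) (fuel : Nat) :
    ∀ (path : List Int) (re : List (List Int)), (path.length : Int) + fuel = r →
      gen_hDfs elements r fuel path re = re ++ (pvF elements fuel).map (fun t => path ++ t) := by
  induction fuel with
  | zero =>
      intro path re h
      simp only [Nat.cast_zero, add_zero] at h
      simp [gen_hDfs, h, pvF]
  | succ fuel ih =>
      intro path re h
      have hne : (path.length : Int) ≠ r := by omega
      rw [gen_hDfs, if_neg hne]
      have hbody : ∀ (acc : List (List Int)) (e : Int), e ∈ elements →
          gen_hDfs elements r fuel (path ++ [e]) acc =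
            acc ++ (pvF elements fuel).map (fun t => (path ++ [e]) ++ t) := by
        intro acc e _
        apply ih
        simp; omega
      rw [PySem.List.foldl_congr_mem (l := elements)
            (f := fun acc e => gen_hDfs elements r fuel (path ++ [e]) acc)
            (g := fun acc e => acc ++ (pvF elements fuel).map (fun t => (path ++ [e]) ++ t))
            (init := re) hbody,
          PySem.List.foldl_append_eq_flatMap]
      simp [pvF, List.map_flatMap, Function.comp_def, List.append_assoc]

theorem pvB_fold (elements : List Int) (l : List Int) :
    ∀ n : Nat,
      l.foldl (fun result _ => result.flatMap (fun p => elements.map (fun elem => p ++ [elem])))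
        (pvF elements n) = pvF elements (n + l.length) := by
  induction l with
  | nil => intro n; simp
  | cons x l ih =>
      intro n
      simp only [List.foldl_cons, ← pvF_succ_back, List.length_cons]
      rw [ih (n + 1)]
      ring_nf

-- ===== VERDICT (by name: the statement is the Claim_ definition above) =====
theorem gen_h_spec : Claim_equal_gen_h := by
  intro elements r _ hpre
  unfold Spec_gen_h gen_h gen_h_alt
  by_cases hemp : elements = []
  · subst hemp
    rw [if_pos rfl]
    by_cases hr0 : r = 0
    · subst hr0; rfl
    · rw [if_neg hr0]
      unfold gen_hDfs
      rw [if_neg (by simpa using (Ne.symm hr0))]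
      cases r.toNat <;> rfl
  · have hr : 0 ≤ r := Or.resolve_right hpre hemp
    rw [if_neg hemp]
    rw [gen_hDfs_eq elements r r.toNat [] [] (by simp; omega)]
    have h := pvB_fold elements (PySem.List.pyRange 0 r 1) 0
    simp only [pvF, PySem.List.length_pyRange_one, Nat.zero_add, sub_zero] at h
    rw [h]
    simp
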